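-- pv_equiv track=rewrite | github.com/Vannico233/GraphScholar | paper_organization.py | merge_split_title_tokens
-- ===== SOURCE A (Python) =====
-- def merge_split_title_tokens(text: str) -> str:
--     tokens = text.split()
--     merged = []
--     i = 0
--     while i < len(tokens):
--         token = tokens[i]
--         if len(token) == 1 and token.isalpha():
--             letters = [token]
--             j = i + 1
--             while j < len(tokens) and len(tokens[j]) == 1 and tokens[j].isalpha():
--                 letters.append(tokens[j])
--                 j += 1
--             if len(letters) >= 3:
--                 merged.append("".join(letters))
--                 i = j
--                 continue
--         merged.append(token)
--         i += 1
--     return " ".join(merged)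
-- ===== SOURCE B (Python) =====
-- def merge_split_title_tokens(text: str) -> str:
--     tokens = text.split()
--     if not tokens:
--         return ""
--     n = len(tokens)
--     letter = [len(t) == 1 and t.isalpha() for t in tokens]
--     # fwd[i] = length of the maximal run of single-letter tokens starting at i
--     fwd = [0] * n
--     for i in range(n - 1, -1, -1):
--         if letter[i]:
--             fwd[i] = 1 + (fwd[i + 1] if i + 1 < n else 0)
--     # decide the separator of each gap: glue two adjacent single letters
--     # exactly when the run they belong to has total length >= 3
--     pieces = [tokens[0]]
--     back = 1 if letter[0] else 0  # letters in the run ending at the previous token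
--     for i in range(1, n):
--         if back > 0 and letter[i] and back + fwd[i] >= 3:
--             pieces.append("")
--         else:
--             pieces.append(" ")
--         pieces.append(tokens[i])
--         back = back + 1 if letter[i] else 0
--     return "".join(pieces)
-- ===== Notes on version B (the rewrite author's own statement) =====
-- stated objective: alternative
-- what changed: Replaced A's index-jumping lookahead scan that builds a merged token list with a run-length-counting algorithm: a backward pass computes for each token the length of the single-letter run starting there, then a forward pass decides for each gap between adjacent tokens whether to emit a space or glue (two adjacent single letters inside a run of total length >= 3) and concatenates pieces directly.
import Mathlib
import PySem

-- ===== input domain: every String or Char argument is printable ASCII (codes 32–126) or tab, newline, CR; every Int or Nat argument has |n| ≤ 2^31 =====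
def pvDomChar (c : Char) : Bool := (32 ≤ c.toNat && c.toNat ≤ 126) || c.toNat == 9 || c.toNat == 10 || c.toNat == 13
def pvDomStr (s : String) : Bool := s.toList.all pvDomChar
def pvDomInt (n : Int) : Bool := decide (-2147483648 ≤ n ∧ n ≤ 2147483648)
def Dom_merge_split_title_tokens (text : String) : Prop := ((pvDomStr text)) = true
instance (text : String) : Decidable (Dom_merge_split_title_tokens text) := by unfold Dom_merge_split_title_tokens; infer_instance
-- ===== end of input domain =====

-- B replaces A's index-jumping lookahead merge by a run-length-count pass plus a per-gap
-- separator decision (alternative decomposition; same cost).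

-- token test shared by both Pythons: len(token) == 1 and token.isalpha()
def pvIsL (t : String) : Bool := PySem.Str.len t == 1 && PySem.Str.strIsalpha t

-- ===== PORT A =====
-- inner while: collect the following single-letter tokens, return (letters, rest)
def pvTakeRun : List String → List String × List String
  | [] => ([], [])
  | u :: rest =>
    if pvIsL u then
      let p := pvTakeRun rest
      (u :: p.1, p.2)
    else ([], u :: rest)

theorem pvTakeRun_snd_le (l : List String) : (pvTakeRun l).2.length ≤ l.length := by
  induction l with
  | nil => simp [pvTakeRun]
  | cons u rest ih =>
    simp only [pvTakeRun]
    split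
    · exact Nat.le_succ_of_le ih
    · simp

-- outer while with index-jumping, as structural recursion on the remaining tokens
def pvMergeLoop : List String → List String
  | [] => []
  | t :: rest =>
    if pvIsL t then
      let p := pvTakeRun rest
      if 3 ≤ (t :: p.1).length then
        PySem.Str.join "" (t :: p.1) :: pvMergeLoop p.2
      else
        t :: pvMergeLoop rest
    else
      t :: pvMergeLoop rest
termination_by l => l.length
decreasing_by
  · exact Nat.lt_succ_of_le (pvTakeRun_snd_le rest)
  · simp
  · simp

def merge_split_title_tokens (text : String) : String :=
  PySem.Str.join " " (pvMergeLoop (PySem.Str.split₀ text))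

-- ===== PORT B =====
-- backward pass of Source B: fwd[i] = length of the single-letter run starting at i
def pvFwd : List Bool → List Nat
  | [] => []
  | b :: rest =>
    let f := pvFwd rest
    (if b then 1 + f.headD 0 else 0) :: f

-- forward pass of Source B over i = 1..n-1 (tokens/letter/fwd read positionwise, back carried):
-- emit "" between two letters of a run of total length >= 3, else " ", then the token
def pvGapLoop : List String → List Bool → List Nat → Nat → List String
  | t :: ts, b :: bs, f :: fs, back =>
    (if decide (0 < back) && b && decide (3 ≤ back + f) then "" else " ")
      :: t :: pvGapLoop ts bs fs (if b then back + 1 else 0)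
  | _, _, _, _ => []

def merge_split_title_tokens_alt (text : String) : String :=
  match PySem.Str.split₀ text with
  | [] => ""
  | t :: ts =>
    let letter := (t :: ts).map pvIsL
    let fwd := pvFwd letter
    let pieces := t :: pvGapLoop ts letter.tail fwd.tail (if letter.headD false then 1 else 0)
    PySem.Str.join "" pieces

-- ===== PRECONDITION & SPEC =====
def Spec_merge_split_title_tokens (text : String) (out : String) : Prop := out = merge_split_title_tokens_alt text
instance (text : String) (out : String) : Decidable (Spec_merge_split_title_tokens text out) := by unfold Spec_merge_split_title_tokens; infer_instance

-- ===== CLAIM (what is proved, stated in full; the proofs are below) =====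
def Claim_equal_merge_split_title_tokens : Prop := ∀ (text : String), Dom_merge_split_title_tokens text → Spec_merge_split_title_tokens text (merge_split_title_tokens text)

-- ===== LEMMAS AND PROOFS =====
theorem pvTakeRun_eq (l : List String) :
    pvTakeRun l = (l.takeWhile pvIsL, l.dropWhile pvIsL) := by
  induction l with
  | nil => simp [pvTakeRun]
  | cons u rest ih =>
    by_cases h : pvIsL u = true
    · simp [pvTakeRun, List.takeWhile, List.dropWhile, h, ih]
    · simp [pvTakeRun, List.takeWhile, List.dropWhile, Bool.eq_false_iff.mpr h]

-- proof-side view of B's gap loop: the letter and fwd lists are the maps they were built as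
def pvG (ts : List String) (back : Nat) : List String :=
  pvGapLoop ts (ts.map pvIsL) (pvFwd (ts.map pvIsL)) back

theorem pvFwd_headD (xs : List String) :
    (pvFwd (xs.map pvIsL)).headD 0 = (xs.takeWhile pvIsL).length := by
  induction xs with
  | nil => simp [pvFwd]
  | cons x rest ih =>
    by_cases h : pvIsL x = true
    · simp only [List.map_cons, pvFwd, h, if_true, List.headD_cons, List.takeWhile_cons]
      rw [ih]
      simp [Nat.add_comm]
    · simp [pvFwd, List.takeWhile, Bool.eq_false_iff.mpr h]

theorem pvG_cons (u : String) (us : List String) (back : Nat) :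
    pvG (u :: us) back =
      (if decide (0 < back) && pvIsL u &&
          decide (3 ≤ back + (if pvIsL u then 1 + (us.takeWhile pvIsL).length else 0))
        then "" else " ")
      :: u :: pvG us (if pvIsL u then back + 1 else 0) := by
  simp only [pvG, List.map_cons, pvFwd, pvGapLoop, pvFwd_headD]

-- only the first step of the gap loop reads `back`; if the next token is not a letter
-- the separator is a space for every back
theorem pvG_indep (us : List String)
    (h : ∀ v, us.head? = some v → pvIsL v = false) (b1 b2 : Nat) :
    pvG us b1 = pvG us b2 := by
  cases us with
  | nil => rfl
  | cons v vs =>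
    have hv : pvIsL v = false := h v rfl
    rw [pvG_cons, pvG_cons, hv]
    simp

theorem pvTW_append (tw dw : List String)
    (hall : ∀ u ∈ tw, pvIsL u = true)
    (hd : ∀ v, dw.head? = some v → pvIsL v = false) :
    (tw ++ dw).takeWhile pvIsL = tw := by
  induction tw with
  | nil =>
    cases dw with
    | nil => rfl
    | cons v vs => simp [hd v rfl]
  | cons u tw' ih =>
    have hu := hall u (by simp)
    simp only [List.cons_append, List.takeWhile, hu]
    rw [ih (fun x hx => hall x (by simp [hx]))]

-- inside a run of total length >= 3 every gap glues
theorem pvRunGlue (tw : List String) (dw : List String) (back : Nat)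
    (hall : ∀ u ∈ tw, pvIsL u = true)
    (hd : ∀ v, dw.head? = some v → pvIsL v = false)
    (hb : 1 ≤ back) (h3 : 3 ≤ back + tw.length) :
    pvG (tw ++ dw) back = tw.flatMap (fun u => ["", u]) ++ pvG dw (back + tw.length) := by
  induction tw generalizing back with
  | nil => simp
  | cons u tw' ih =>
    have hu := hall u (by simp)
    have htw : (tw' ++ dw).takeWhile pvIsL = tw' :=
      pvTW_append tw' dw (fun x hx => hall x (by simp [hx])) hd
    rw [List.cons_append, pvG_cons, hu]
    have hsep : (decide (0 < back) && true &&
        decide (3 ≤ back + (if true = true then 1 + ((tw' ++ dw).takeWhile pvIsL).length else 0))) = true := by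
      rw [htw]
      simp only [List.length_cons] at h3
      simp only [if_true, Bool.and_eq_true, Bool.and_true, decide_eq_true_eq]
      omega
    rw [hsep]
    simp only [if_true]
    rw [ih (back + 1) (fun x hx => hall x (List.mem_cons_of_mem _ hx)) (by omega)
      (by simp only [List.length_cons] at h3; omega)]
    simp only [List.flatMap_cons, List.length_cons]
    have : back + 1 + tw'.length = back + (tw'.length + 1) := by omega
    rw [this]
    simp

theorem pvMergeLoop_ne_nil (t : String) (ts : List String) :
    pvMergeLoop (t :: ts) ≠ [] := by
  rw [pvMergeLoop]
  dsimp only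
  split
  · split <;> simp
  · simp

-- "".join over char lists is concatenation
theorem pvJoinNil (ps : List (List Char)) : PySem.Chars.join [] ps = ps.flatten := by
  induction ps with
  | nil => simp [PySem.Chars.join_nil]
  | cons p rest ih =>
    cases rest with
    | nil => simp [PySem.Chars.join_singleton]
    | cons q rs =>
      rw [PySem.Chars.join_cons_cons]
      simp [ih]

theorem pvSpaceToList : (" " : String).toList = [' '] := rfl
theorem pvEmptyToList : ("" : String).toList = [] := rfl

theorem pvFlatPairs (tw : List String) :
    (List.map String.toList (tw.flatMap (fun u => [("" : String), u]))).flatten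
      = (List.map String.toList tw).flatten := by
  induction tw with
  | nil => rfl
  | cons u tw' ih => simp [ih]

-- MAIN: B's glued pieces spell out exactly " ".join of A's merged list
theorem pvMain (n : Nat) : ∀ (t : String) (ts : List String), (t :: ts).length ≤ n →
    t.toList ++ (List.map String.toList (pvG ts (if pvIsL t then 1 else 0))).flatten
      = PySem.Chars.join [' '] ((pvMergeLoop (t :: ts)).map String.toList) := by
  induction n with
  | zero => intro t ts h; simp at h
  | succ n ih =>
    intro t ts h
    by_cases hL : pvIsL t = true
    case neg =>
      have hLf : pvIsL t = false := Bool.eq_false_iff.mpr hL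
      rw [pvMergeLoop]
      simp only [hLf, Bool.false_eq_true, if_false, List.map_cons]
      cases ts with
      | nil =>
        simp [pvG, pvGapLoop, pvMergeLoop, PySem.Chars.join_singleton]
      | cons u us =>
        obtain ⟨w, ws, hw⟩ : ∃ w ws, pvMergeLoop (u :: us) = w :: ws := by
          cases hm : pvMergeLoop (u :: us) with
          | nil => exact absurd hm (pvMergeLoop_ne_nil u us)
          | cons w ws => exact ⟨w, ws, rfl⟩
        rw [hw, List.map_cons, PySem.Chars.join_cons_cons, ← List.map_cons, ← hw]
        rw [← ih u us (by simpa using Nat.le_of_succ_le_succ h)]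
        rw [pvG_cons]
        simp [pvSpaceToList, List.append_assoc]
    case pos =>
      rw [pvMergeLoop, pvTakeRun_eq]
      simp only [hL, if_true]
      have hall : ∀ u ∈ ts.takeWhile pvIsL, pvIsL u = true :=
        fun u hu => List.mem_takeWhile_imp hu
      have hd : ∀ v, (ts.dropWhile pvIsL).head? = some v → pvIsL v = false := by
        intro v hv
        have hx := List.head?_dropWhile_not pvIsL ts
        rw [hv] at hx
        exact hx
      by_cases h3 : 3 ≤ (t :: ts.takeWhile pvIsL).length
      case pos =>
        simp only [if_pos h3]
        -- B glues the whole run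
        conv_lhs => rw [← List.takeWhile_append_dropWhile (p := pvIsL) (l := ts)]
        rw [pvRunGlue _ _ 1 hall hd (by omega)
          (by simp only [List.length_cons] at h3; omega)]
        have hjoin : (PySem.Str.join "" (t :: ts.takeWhile pvIsL)).toList
            = t.toList ++ (List.map String.toList (ts.takeWhile pvIsL)).flatten := by
          rw [PySem.Str.toList_join, pvEmptyToList, pvJoinNil]
          simp
        cases hcd : ts.dropWhile pvIsL with
        | nil =>
          rw [pvMergeLoop]
          simp [PySem.Chars.join_singleton, hjoin, pvFlatPairs, pvG, pvGapLoop]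
        | cons v vs =>
          obtain ⟨w, ws, hw⟩ : ∃ w ws, pvMergeLoop (v :: vs) = w :: ws := by
            cases hm : pvMergeLoop (v :: vs) with
            | nil => exact absurd hm (pvMergeLoop_ne_nil v vs)
            | cons w ws => exact ⟨w, ws, rfl⟩
          have hlen : (v :: vs).length ≤ n := by
            have h1 : (ts.dropWhile pvIsL).length ≤ ts.length := List.length_dropWhile_le _ _
            rw [hcd] at h1
            simp at h h1 ⊢
            omega
          rw [List.map_cons, hw, List.map_cons, PySem.Chars.join_cons_cons,
            ← List.map_cons, ← hw, ← ih v vs hlen]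
          have hv : pvIsL v = false := hd v (by rw [hcd]; rfl)
          rw [pvG_cons]
          simp [hv, hjoin, pvFlatPairs, pvSpaceToList, List.append_assoc]
      case neg =>
        simp only [if_neg h3]
        -- run too short: every separator stays a space
        cases ts with
        | nil => simp [pvG, pvGapLoop, pvMergeLoop, PySem.Chars.join_singleton]
        | cons u us =>
          obtain ⟨w, ws, hw⟩ : ∃ w ws, pvMergeLoop (u :: us) = w :: ws := by
            cases hm : pvMergeLoop (u :: us) with
            | nil => exact absurd hm (pvMergeLoop_ne_nil u us)
            | cons w ws => exact ⟨w, ws, rfl⟩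
          rw [List.map_cons, hw, List.map_cons, PySem.Chars.join_cons_cons,
            ← List.map_cons, ← hw, ← ih u us (by simpa using Nat.le_of_succ_le_succ h)]
          rw [pvG_cons]
          by_cases hu : pvIsL u = true
          case pos =>
            have hRL : (us.takeWhile pvIsL).length = 0 := by
              simp only [List.takeWhile_cons, hu, if_true, List.length_cons] at h3
              omega
            have hhead : ∀ v, us.head? = some v → pvIsL v = false := by
              intro v hv
              cases us with
              | nil => cases hv
              | cons a as =>
                have hav : a = v := by simpa using hv
                subst hav
                by_contra hva
                simp only [Bool.not_eq_false] at hva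
                simp [hva] at hRL
            simp only [hu, if_true]
            rw [pvG_indep us hhead (1 + 1) 1]
            simp [hRL, pvSpaceToList, List.append_assoc]
          case neg =>
            simp [hu, pvSpaceToList, List.append_assoc]

-- ===== VERDICT (by name: the statement is the Claim_ definition above) =====
theorem merge_split_title_tokens_spec : Claim_equal_merge_split_title_tokens := by
  intro text _
  unfold Spec_merge_split_title_tokens merge_split_title_tokens merge_split_title_tokens_alt
  cases hsp : PySem.Str.split₀ text with
  | nil => rw [pvMergeLoop]; rfl
  | cons t ts =>
    show PySem.Str.join " " (pvMergeLoop (t :: ts))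
        = PySem.Str.join "" (t :: pvG ts (if pvIsL t then 1 else 0))
    show String.ofList (PySem.Chars.join [' '] ((pvMergeLoop (t :: ts)).map String.toList))
        = String.ofList (PySem.Chars.join []
            ((t :: pvG ts (if pvIsL t then 1 else 0)).map String.toList))
    refine congrArg String.ofList ?_
    rw [pvJoinNil, List.map_cons, List.flatten_cons,
      ← pvMain (t :: ts).length t ts (le_refl _)]
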